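-- pv_equiv track=rewrite | github.com/MaxProspero/permanence-os | dashboard_api.py | _parse_outreach_pack
-- ===== SOURCE A (Python) =====
-- from typing import Optional
--
-- def _parse_outreach_pack(markdown: str) -> list[dict]:
--     if not markdown:
--         return []
--     messages: list[dict] = []
--     current: Optional[dict] = None
--     in_body = False
--     body_lines: list[str] = []
--
--     for raw in markdown.splitlines():
--         line = raw.rstrip("\n")
--         text = line.strip()
--         if text.startswith("### "):
--             if current is not None:
--                 current["body"] = "\n".join(body_lines).strip()
--                 messages.append(current)
--             current = {
--                 "title": text[4:].strip(),
--                 "stage": "",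
--                 "channel": "",
--                 "subject": "",
--                 "body": "",
--             }
--             body_lines = []
--             in_body = False
--             continue
--
--         if current is None:
--             continue
--
--         if text == "```text":
--             in_body = True
--             continue
--         if text == "```":
--             in_body = False
--             continue
--         if in_body:
--             body_lines.append(line)
--             continue
--
--         if text.startswith("- Stage:"):
--             current["stage"] = text.split(":", 1)[1].strip()
--         elif text.startswith("- Channel:"):
--             current["channel"] = text.split(":", 1)[1].strip()
--         elif text.startswith("- Subject:"):
--             current["subject"] = text.split(":", 1)[1].strip()
--
--     if current is not None:
--         current["body"] = "\n".join(body_lines).strip()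
--         messages.append(current)
--     return messages
-- ===== SOURCE B (Python) =====
-- # Segment-first re-implementation: split lines into '### ' sections, then parse each
-- # section independently with a small local loop (A uses one fused stateful pass).
--
-- def _is_header(raw):
--     return raw.rstrip("\n").strip().startswith("### ")
--
--
-- def _field(text):
--     return text.split(":", 1)[1].strip()
--
--
-- def _parse_section(title, lines):
--     stage = channel = subject = ""
--     in_body = False
--     buf = []
--     for raw in lines:
--         line = raw.rstrip("\n")
--         text = line.strip()
--         if text == "```text":
--             in_body = True
--         elif text == "```":
--             in_body = False
--         elif in_body:
--             buf.append(line)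
--         elif text.startswith("- Stage:"):
--             stage = _field(text)
--         elif text.startswith("- Channel:"):
--             channel = _field(text)
--         elif text.startswith("- Subject:"):
--             subject = _field(text)
--     return {
--         "title": title,
--         "stage": stage,
--         "channel": channel,
--         "subject": subject,
--         "body": "\n".join(buf).strip(),
--     }
--
--
-- def _parse_outreach_pack(markdown: str) -> list:
--     lines = markdown.splitlines()
--     n = len(lines)
--     out = []
--     i = 0
--     while i < n and not _is_header(lines[i]):
--         i += 1
--     while i < n:
--         j = i + 1
--         while j < n and not _is_header(lines[j]):
--             j += 1
--         title = lines[i].rstrip("\n").strip()[4:].strip()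
--         out.append(_parse_section(title, lines[i + 1:j]))
--         i = j
--     return out
-- ===== Notes on version B (the rewrite author's own statement) =====
-- stated objective: alternative
-- what changed: Replaces the single fused stateful pass (messages/current/in_body/body_lines juggled together with a trailing flush) by a segment-first parse: the line list is split into '### ' sections and each section is parsed independently by a small local loop, so no cross-section state or final flush exists.
import Mathlib
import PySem

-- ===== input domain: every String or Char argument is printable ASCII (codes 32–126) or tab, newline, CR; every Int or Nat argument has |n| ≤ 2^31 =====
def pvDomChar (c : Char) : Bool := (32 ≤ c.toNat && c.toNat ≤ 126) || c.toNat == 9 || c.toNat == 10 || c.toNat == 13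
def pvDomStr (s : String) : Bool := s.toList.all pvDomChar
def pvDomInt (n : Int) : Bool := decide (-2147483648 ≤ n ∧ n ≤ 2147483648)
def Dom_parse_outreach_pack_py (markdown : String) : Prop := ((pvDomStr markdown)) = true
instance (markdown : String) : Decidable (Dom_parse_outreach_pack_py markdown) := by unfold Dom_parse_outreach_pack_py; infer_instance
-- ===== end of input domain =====

-- B parses segment-first (split the lines into '### ' sections, parse each with a local loop)
-- instead of A's one fused stateful pass; the return values are proved equal on all inputs.

-- shared line-level primitives (this per-line code is textually identical in both Pythons)
-- exact port of raw.rstrip("\n"): drop trailing '\n' characters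
def pvRstripNL (raw : String) : String :=
  String.ofList ((raw.toList.reverse.dropWhile (fun c => c == '\n')).reverse)

-- exact port of text.split(":", 1)[1].strip(); every caller guards with startswith("- X:"),
-- so ':' occurs in text, the split has two pieces and Python's [1] cannot raise
def pvFieldVal (text : String) : String :=
  PySem.Str.strip (((PySem.Str.splitMax? text ":" 1).getD []).getD 1 "")

-- ===== PORT A =====
-- the dict literal A creates at a '### ' header (body always still "")
def pvMkD (t sg ch su : String) : PySem.Dict String String :=
  ⟨[("title", t), ("stage", sg), ("channel", ch), ("subject", su), ("body", "")]⟩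

-- loop state: (messages, current, in_body, body_lines)
def pvAState := List (PySem.Dict String String) × Option (PySem.Dict String String) × Bool × List String

def pvAStep (st : pvAState) (raw : String) : pvAState :=
  let (msgs, cur, in_body, body_lines) := st
  let line := pvRstripNL raw
  let text := PySem.Str.strip line
  if PySem.Str.startswith text "### " then
    let msgs' := match cur with
      | none => msgs
      | some c => msgs ++ [PySem.Dict.insert c "body" (PySem.Str.strip (PySem.Str.join "\n" body_lines))]
    (msgs', some (pvMkD (PySem.Str.strip (PySem.Str.slice text (some 4) none)) "" "" ""), false, [])
  else
    match cur with
    | none => (msgs, cur, in_body, body_lines)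
    | some c =>
      if text == "```text" then (msgs, some c, true, body_lines)
      else if text == "```" then (msgs, some c, false, body_lines)
      else if in_body then (msgs, some c, in_body, body_lines ++ [line])
      else if PySem.Str.startswith text "- Stage:" then
        (msgs, some (PySem.Dict.insert c "stage" (pvFieldVal text)), in_body, body_lines)
      else if PySem.Str.startswith text "- Channel:" then
        (msgs, some (PySem.Dict.insert c "channel" (pvFieldVal text)), in_body, body_lines)
      else if PySem.Str.startswith text "- Subject:" then
        (msgs, some (PySem.Dict.insert c "subject" (pvFieldVal text)), in_body, body_lines)
      else (msgs, some c, in_body, body_lines)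

-- the trailing 'if current is not None: …; return messages'
def pvAFinish (st : pvAState) : List (PySem.Dict String String) :=
  let (msgs, cur, _, body_lines) := st
  match cur with
  | none => msgs
  | some c => msgs ++ [PySem.Dict.insert c "body" (PySem.Str.strip (PySem.Str.join "\n" body_lines))]

def parse_outreach_pack_py (markdown : String) : List (List (String × String)) :=
  if markdown == "" then []
  else (pvAFinish ((PySem.Str.splitlines markdown).foldl pvAStep ([], none, false, []))).map PySem.Dict.items

-- ===== PORT B =====
def pvIsHeader (raw : String) : Bool :=
  PySem.Str.startswith (PySem.Str.strip (pvRstripNL raw)) "### "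

-- per-section loop state: ((stage, channel, subject), in_body, buf)
def pvSecStep (st : (String × String × String) × Bool × List String) (raw : String) :
    (String × String × String) × Bool × List String :=
  let ((sg, ch, su), in_body, buf) := st
  let line := pvRstripNL raw
  let text := PySem.Str.strip line
  if text == "```text" then ((sg, ch, su), true, buf)
  else if text == "```" then ((sg, ch, su), false, buf)
  else if in_body then ((sg, ch, su), in_body, buf ++ [line])
  else if PySem.Str.startswith text "- Stage:" then ((pvFieldVal text, ch, su), in_body, buf)
  else if PySem.Str.startswith text "- Channel:" then ((sg, pvFieldVal text, su), in_body, buf)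
  else if PySem.Str.startswith text "- Subject:" then ((sg, ch, pvFieldVal text), in_body, buf)
  else ((sg, ch, su), in_body, buf)

def pvParseSection (title : String) (lines : List String) : List (String × String) :=
  let ((sg, ch, su), _, buf) := lines.foldl pvSecStep (("", "", ""), false, [])
  [("title", title), ("stage", sg), ("channel", ch), ("subject", su),
   ("body", PySem.Str.strip (PySem.Str.join "\n" buf))]

-- the two index loops of Source B: skip non-header lines; at a header, cut the section running
-- to the next header (takeWhile/dropWhile = the inner 'while j < n and not _is_header' scan).
-- fuel (= number of remaining lines) only makes the recursion structural; it never runs out.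
def pvAltGoF : Nat → List String → List (List (String × String))
  | 0, _ => []
  | _, [] => []
  | fuel + 1, l :: rest =>
    if pvIsHeader l then
      pvParseSection
          (PySem.Str.strip (PySem.Str.slice (PySem.Str.strip (pvRstripNL l)) (some 4) none))
          (rest.takeWhile (fun x => !pvIsHeader x))
        :: pvAltGoF fuel (rest.dropWhile (fun x => !pvIsHeader x))
    else pvAltGoF fuel rest

def pvAltGo (lines : List String) : List (List (String × String)) :=
  pvAltGoF lines.length lines

def parse_outreach_pack_py_alt (markdown : String) : List (List (String × String)) :=
  pvAltGo (PySem.Str.splitlines markdown)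

-- ===== PRECONDITION & SPEC =====
def Spec_parse_outreach_pack_py (markdown : String) (out : List (List (String × String))) : Prop := out = parse_outreach_pack_py_alt markdown
instance (markdown : String) (out : List (List (String × String))) : Decidable (Spec_parse_outreach_pack_py markdown out) := by unfold Spec_parse_outreach_pack_py; infer_instance

-- ===== CLAIM (what is proved, stated in full; the proofs are below) =====
def Claim_equal_parse_outreach_pack_py : Prop := ∀ (markdown : String), Dom_parse_outreach_pack_py markdown → Spec_parse_outreach_pack_py markdown (parse_outreach_pack_py markdown)

-- ===== LEMMAS AND PROOFS =====

theorem pvInsert_stage (t sg ch su v : String) :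
    PySem.Dict.insert (pvMkD t sg ch su) "stage" v = pvMkD t v ch su := by
  simp [pvMkD, PySem.Dict.insert]

theorem pvInsert_channel (t sg ch su v : String) :
    PySem.Dict.insert (pvMkD t sg ch su) "channel" v = pvMkD t sg v su := by
  simp [pvMkD, PySem.Dict.insert]

theorem pvInsert_subject (t sg ch su v : String) :
    PySem.Dict.insert (pvMkD t sg ch su) "subject" v = pvMkD t sg ch v := by
  simp [pvMkD, PySem.Dict.insert]

theorem pvInsert_body (t sg ch su b : String) :
    (PySem.Dict.insert (pvMkD t sg ch su) "body" b).items =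
      [("title", t), ("stage", sg), ("channel", ch), ("subject", su), ("body", b)] := by
  simp [pvMkD, PySem.Dict.insert]

-- the fuel argument is irrelevant as long as it covers the list
theorem pvAltGoF_congr : ∀ (fuel fuel' : Nat) (lines : List String),
    lines.length ≤ fuel → lines.length ≤ fuel' → pvAltGoF fuel lines = pvAltGoF fuel' lines := by
  intro fuel
  induction fuel with
  | zero => intro fuel' lines h _; cases lines with
    | nil => cases fuel' <;> rfl
    | cons l rest => simp at h
  | succ n ih =>
    intro fuel' lines h h'
    cases lines with
    | nil => cases fuel' <;> rfl
    | cons l rest =>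
      cases fuel' with
      | zero => simp at h'
      | succ m =>
        simp only [List.length_cons, Nat.succ_le_succ_iff] at h h'
        simp only [pvAltGoF]
        by_cases hh : pvIsHeader l
        · simp only [hh, if_true]
          have hd : (rest.dropWhile (fun x => !pvIsHeader x)).length ≤ rest.length :=
            List.length_dropWhile_le _ _
          rw [ih m _ (le_trans hd h) (le_trans hd h')]
        · simp only [hh]
          exact ih m rest h h'

theorem pvAltGo_nil : pvAltGo [] = [] := rfl

theorem pvAltGo_cons (l : String) (rest : List String) :
    pvAltGo (l :: rest) =
      if pvIsHeader l then
        pvParseSection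
            (PySem.Str.strip (PySem.Str.slice (PySem.Str.strip (pvRstripNL l)) (some 4) none))
            (rest.takeWhile (fun x => !pvIsHeader x))
          :: pvAltGo (rest.dropWhile (fun x => !pvIsHeader x))
      else pvAltGo rest := by
  show pvAltGoF (rest.length + 1) (l :: rest) = _
  simp only [pvAltGoF]
  by_cases hh : pvIsHeader l
  · simp only [hh, if_true, pvAltGo]
    rw [pvAltGoF_congr rest.length (rest.dropWhile (fun x => !pvIsHeader x)).length _
      (List.length_dropWhile_le _ _) (Nat.le_refl _)]
  · have hf : pvIsHeader l = false := by simpa using hh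
    simp only [hf, Bool.false_eq_true, if_false, pvAltGo]

-- A's non-header step on an open section is exactly B's per-section step
theorem pvAStep_nonheader (msgs : List (PySem.Dict String String)) (t sg ch su : String)
    (ib : Bool) (bl : List String) (l : String) (h : pvIsHeader l = false) :
    pvAStep (msgs, some (pvMkD t sg ch su), ib, bl) l =
      (msgs,
       some (pvMkD t (pvSecStep ((sg, ch, su), ib, bl) l).1.1 (pvSecStep ((sg, ch, su), ib, bl) l).1.2.1
                     (pvSecStep ((sg, ch, su), ib, bl) l).1.2.2),
       (pvSecStep ((sg, ch, su), ib, bl) l).2.1,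
       (pvSecStep ((sg, ch, su), ib, bl) l).2.2) := by
  simp only [pvIsHeader] at h
  simp only [pvAStep, pvSecStep, h, Bool.false_eq_true, if_false]
  split_ifs <;> simp [pvInsert_stage, pvInsert_channel, pvInsert_subject]

-- B's per-section finish, resumable from any mid-section state (proof-only helper)
def pvSecCont (t : String) (st : (String × String × String) × Bool × List String)
    (lines : List String) : List (String × String) :=
  let ((sg, ch, su), _, buf) := lines.foldl pvSecStep st
  [("title", t), ("stage", sg), ("channel", ch), ("subject", su),
   ("body", PySem.Str.strip (PySem.Str.join "\n" buf))]

-- A's run with an open section = finish that section B-style, continue at the next header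
theorem pvRunA_some : ∀ (lines : List String) (msgs : List (PySem.Dict String String))
    (t sg ch su : String) (ib : Bool) (bl : List String),
    (pvAFinish (lines.foldl pvAStep (msgs, some (pvMkD t sg ch su), ib, bl))).map PySem.Dict.items =
      msgs.map PySem.Dict.items ++
        pvSecCont t ((sg, ch, su), ib, bl) (lines.takeWhile (fun x => !pvIsHeader x))
          :: pvAltGo (lines.dropWhile (fun x => !pvIsHeader x)) := by
  intro lines
  induction lines with
  | nil =>
    intro msgs t sg ch su ib bl
    simp [pvAFinish, pvSecCont, pvAltGo_nil, pvInsert_body]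
  | cons l rest ih =>
    intro msgs t sg ch su ib bl
    by_cases hh : pvIsHeader l
    · have hstep : pvAStep (msgs, some (pvMkD t sg ch su), ib, bl) l =
          (msgs ++ [PySem.Dict.insert (pvMkD t sg ch su) "body"
                      (PySem.Str.strip (PySem.Str.join "\n" bl))],
           some (pvMkD (PySem.Str.strip (PySem.Str.slice (PySem.Str.strip (pvRstripNL l)) (some 4) none)) "" "" ""),
           false, []) := by
        have hh2 : PySem.Chars.startswith (PySem.Chars.strip (pvRstripNL l).toList)
            ['#', '#', '#', ' '] = true := by simpa [pvIsHeader] using hh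
        simp [pvAStep, hh2]
      simp only [List.foldl_cons, hstep, ih]
      simp only [List.takeWhile_cons, List.dropWhile_cons, hh, Bool.not_true,
        Bool.false_eq_true, if_false, pvAltGo_cons]
      simp [pvSecCont, pvParseSection, pvInsert_body]
    · have hh' : pvIsHeader l = false := by simpa using hh
      simp only [List.foldl_cons, pvAStep_nonheader msgs t sg ch su ib bl l hh', ih]
      simp only [List.takeWhile_cons, List.dropWhile_cons, hh', Bool.not_false, if_true]
      simp [pvSecCont]

-- A's run with no open section = B's section recursion
theorem pvRunA_none : ∀ (lines : List String) (msgs : List (PySem.Dict String String))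
    (ib : Bool) (bl : List String),
    (pvAFinish (lines.foldl pvAStep (msgs, none, ib, bl))).map PySem.Dict.items =
      msgs.map PySem.Dict.items ++ pvAltGo lines := by
  intro lines
  induction lines with
  | nil => intro msgs ib bl; simp [pvAFinish, pvAltGo_nil]
  | cons l rest ih =>
    intro msgs ib bl
    by_cases hh : pvIsHeader l
    · have hstep : pvAStep (msgs, none, ib, bl) l =
          (msgs, some (pvMkD (PySem.Str.strip (PySem.Str.slice (PySem.Str.strip (pvRstripNL l)) (some 4) none)) "" "" ""),
           false, []) := by
        have hh2 : PySem.Chars.startswith (PySem.Chars.strip (pvRstripNL l).toList)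
            ['#', '#', '#', ' '] = true := by simpa [pvIsHeader] using hh
        simp [pvAStep, hh2]
      simp only [List.foldl_cons, hstep, pvRunA_some, pvAltGo_cons, if_pos hh]
      simp [pvSecCont, pvParseSection]
    · have hh' : pvIsHeader l = false := by simpa using hh
      have hstep : pvAStep (msgs, none, ib, bl) l = (msgs, none, ib, bl) := by
        have hh2 : PySem.Chars.startswith (PySem.Chars.strip (pvRstripNL l).toList)
            ['#', '#', '#', ' '] = false := by simpa [pvIsHeader] using hh'
        simp [pvAStep, hh2]
      simp only [List.foldl_cons, hstep, ih, pvAltGo_cons, hh', Bool.false_eq_true, if_false]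

-- ===== VERDICT (by name: the statement is the Claim_ definition above) =====
theorem parse_outreach_pack_py_spec : Claim_equal_parse_outreach_pack_py := by
  intro md _
  unfold Spec_parse_outreach_pack_py parse_outreach_pack_py parse_outreach_pack_py_alt
  by_cases h : md = ""
  · subst h; decide
  · rw [if_neg (by simpa using h)]
    simpa using pvRunA_none (PySem.Str.splitlines md) [] false []
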